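-- pv_equiv track=rewrite | github.com/palanceli/opencv-learning | samples.py | getEventFlagsName
-- ===== SOURCE A (Python) =====
-- def getEventFlagsName(value):
--     valueNameMap = {1:'EVENT_FLAG_LBUTTON', 2:'EVENT_FLAG_RBUTTON',
--     4:'EVENT_FLAG_MBUTTON', 8:'EVENT_FLAG_CTRLKEY',
--     16:'EVENT_FLAG_SHIFTKEY', 32:'EVENT_FLAG_ALTKEY'}
--     name = ''
--     for k, v in valueNameMap.items():
--         if value & k != 0:
--             if len(name) == 0:
--                 name = v
--             else:
--                 name += '|%s' % v
--
--     return name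
-- ===== SOURCE B (Python) =====
-- def getEventFlagsName(value):
--     valueNameMap = {1:'EVENT_FLAG_LBUTTON', 2:'EVENT_FLAG_RBUTTON',
--     4:'EVENT_FLAG_MBUTTON', 8:'EVENT_FLAG_CTRLKEY',
--     16:'EVENT_FLAG_SHIFTKEY', 32:'EVENT_FLAG_ALTKEY'}
--     bits = value & 63
--     parts = []
--     while bits:
--         low = bits & -bits          # lowest set bit, ascending = map order
--         parts.append(valueNameMap[low])
--         bits ^= low
--     return '|'.join(parts)
-- ===== Notes on version B (the rewrite author's own statement) =====
-- stated objective: alternative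
-- what changed: Instead of scanning the whole flag table with an accumulator and a first-vs-subsequent separator branch, B masks value to its six flag bits and loops only over the SET bits, extracting the lowest set bit (bits & -bits) each round, looking its name up in the map, and finally '|'.join-ing the gathered parts.
import Mathlib
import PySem

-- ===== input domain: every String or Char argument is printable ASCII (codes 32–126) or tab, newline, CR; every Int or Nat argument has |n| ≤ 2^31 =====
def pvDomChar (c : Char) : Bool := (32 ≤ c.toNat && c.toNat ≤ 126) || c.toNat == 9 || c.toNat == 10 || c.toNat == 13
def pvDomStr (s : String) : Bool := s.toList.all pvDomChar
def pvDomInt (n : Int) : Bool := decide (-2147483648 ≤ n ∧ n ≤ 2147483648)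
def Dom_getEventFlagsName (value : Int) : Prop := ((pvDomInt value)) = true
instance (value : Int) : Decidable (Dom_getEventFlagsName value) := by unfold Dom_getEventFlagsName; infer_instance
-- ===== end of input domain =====

-- B replaces A's scan of the whole flag table (with its first-vs-subsequent separator
-- branch) by a loop over only the SET bits of value & 63, peeling the lowest set bit
-- each round and joining the gathered names at the end. Same value for every int.

-- ===== PORT A =====
-- the dict literal, in insertion order
def pvValueNameMap : List (Int × String) :=
  [(1, "EVENT_FLAG_LBUTTON"), (2, "EVENT_FLAG_RBUTTON"),
   (4, "EVENT_FLAG_MBUTTON"), (8, "EVENT_FLAG_CTRLKEY"),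
   (16, "EVENT_FLAG_SHIFTKEY"), (32, "EVENT_FLAG_ALTKEY")]

def getEventFlagsName (value : Int) : String :=
  pvValueNameMap.foldl (fun name kv =>
    if PySem.Int.band value kv.1 ≠ 0 then
      if PySem.Str.len name = 0 then kv.2
      else name ++ ("|" ++ kv.2)
    else name) ""

-- ===== PORT B =====
-- the same dict literal, as B's lookup table
def pvMapB : PySem.Dict Int String :=
  PySem.Dict.ofList
    [(1, "EVENT_FLAG_LBUTTON"), (2, "EVENT_FLAG_RBUTTON"),
     (4, "EVENT_FLAG_MBUTTON"), (8, "EVENT_FLAG_CTRLKEY"),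
     (16, "EVENT_FLAG_SHIFTKEY"), (32, "EVENT_FLAG_ALTKEY")]

-- Source B's while loop: peel the lowest set bit each round. The fuel only makes the
-- recursion structural; bits = value & 63 < 64 so it is never exhausted.
def pvCollect : Nat → Int → List String → List String
  | 0, _, parts => parts
  | fuel + 1, bits, parts =>
    if bits = 0 then parts
    else
      let low := PySem.Int.band bits (-bits)
      pvCollect fuel (PySem.Int.bxor bits low) (parts ++ [PySem.Dict.getD pvMapB low ""])

def getEventFlagsName_alt (value : Int) : String :=
  PySem.Str.join "|" (pvCollect 64 (PySem.Int.band value 63) [])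

-- ===== PRECONDITION & SPEC =====
def Spec_getEventFlagsName (value : Int) (out : String) : Prop := out = getEventFlagsName_alt value
instance (value : Int) (out : String) : Decidable (Spec_getEventFlagsName value out) := by unfold Spec_getEventFlagsName; infer_instance

-- ===== CLAIM (what is proved, stated in full; the proofs are below) =====
def Claim_equal_getEventFlagsName : Prop := ∀ (value : Int), Dom_getEventFlagsName value → Spec_getEventFlagsName value (getEventFlagsName value)

-- ===== LEMMAS AND PROOFS =====

-- the names of the flags set in v, in table order (common midpoint of both proofs)
def pvNames (v : Int) : List String :=
  (pvValueNameMap.filter (fun kv => PySem.Int.band v kv.1 ≠ 0)).map (·.2)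

-- a &&& below 64 only sees the other operand mod 64
theorem pv_land_mod64 (k w : Nat) (hk : k < 64) : k &&& w = k &&& (w % 64) := by
  apply Nat.eq_of_testBit_eq
  intro i
  have h64 : (64 : Nat) = 2 ^ 6 := by norm_num
  rw [h64, Nat.testBit_and, Nat.testBit_and, Nat.testBit_mod_two_pow]
  by_cases hi : i < 6
  · simp [hi]
  · have : k < 2 ^ i := lt_of_lt_of_le (by omega : k < 2 ^ 6)
      (Nat.pow_le_pow_right (by norm_num) (by omega))
    simp [hi, Nat.testBit_lt_two_pow this]

theorem pv_land_mod64' (k w : Nat) (hk : k < 64) : w &&& k = (w % 64) &&& k := by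
  rw [Nat.and_comm, pv_land_mod64 k w hk, Nat.and_comm]

-- PySem.Int.band of a negative int against a nonnegative one, in Nat terms
theorem pv_bandNeg (w k : Nat) :
    PySem.Int.band (Int.negSucc w) (Int.ofNat k) = Int.ofNat (k - (k &&& w)) := by
  simp only [PySem.Int.band, Int.ofNat_eq_natCast]
  have hw : (-Int.negSucc w - 1) = (w : Int) := by
    rw [Int.neg_negSucc]; push_cast; ring
  rw [hw]
  rw [if_neg (Int.not_le.mpr (Int.negSucc_lt_zero w)), if_pos (by positivity : (0:Int) ≤ (k:Int))]
  simp only [Int.toNat_natCast]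

-- a band against a flag constant only depends on the argument mod 64
theorem pv_band_pos (n k : Nat) (hk : k < 64) :
    PySem.Int.band (Int.ofNat n) (Int.ofNat k) = PySem.Int.band (Int.ofNat (n % 64)) (Int.ofNat k) := by
  have a1 : PySem.Int.band (Int.ofNat n) (Int.ofNat k) = Int.ofNat (n &&& k) :=
    PySem.Int.band_natCast n k
  have a2 : PySem.Int.band (Int.ofNat (n % 64)) (Int.ofNat k) = Int.ofNat ((n % 64) &&& k) :=
    PySem.Int.band_natCast (n % 64) k
  rw [a1, a2, pv_land_mod64' k n hk]

theorem pv_band_neg (w k : Nat) (hk : k < 64) :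
    PySem.Int.band (Int.negSucc w) (Int.ofNat k) = PySem.Int.band (Int.negSucc (w % 64)) (Int.ofNat k) := by
  rw [pv_bandNeg, pv_bandNeg, pv_land_mod64 k w hk]

-- joining absorbs one manual '… ++ "|" ++ …' step (chars level)
theorem pv_chars_absorb (sep p q : List Char) (r : List (List Char)) :
    PySem.Chars.join sep ((p ++ (sep ++ q)) :: r) = PySem.Chars.join sep (p :: q :: r) := by
  cases r with
  | nil =>
    simp [PySem.Chars.join_singleton, PySem.Chars.join_cons_cons, List.append_assoc]
  | cons c r' =>
    simp [PySem.Chars.join_cons_cons, List.append_assoc]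

theorem pv_join_absorb (a b : String) (r : List String) :
    PySem.Str.join "|" ((a ++ ("|" ++ b)) :: r) = PySem.Str.join "|" (a :: b :: r) := by
  apply String.toList_inj.mp
  simp only [PySem.Str.toList_join, List.map_cons, String.toList_append]
  exact pv_chars_absorb _ _ _ _

-- A's accumulator loop, started on a nonempty accumulator, is a join
theorem pv_join_aux (l : List String) (acc : String) (h : PySem.Str.len acc ≠ 0) :
    (l.foldl (fun name s => if PySem.Str.len name = 0 then s else name ++ ("|" ++ s)) acc)
      = PySem.Str.join "|" (acc :: l) := by
  induction l generalizing acc with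
  | nil =>
    apply String.toList_inj.mp
    simp only [List.foldl_nil, PySem.Str.toList_join, List.map_cons, List.map_nil,
      PySem.Chars.join_singleton]
  | cons s r ih =>
    have hacc : PySem.Str.len (acc ++ ("|" ++ s)) ≠ 0 := by
      simp at *
      omega
    simp only [List.foldl_cons, if_neg h]
    rw [ih _ hacc, pv_join_absorb]

-- loop shape: A's guarded fold is a fold over the filtered list
theorem pv_foldl_filter {A B : Type} (p : A → Prop) [DecidablePred p] (f : B → A → B) (l : List A) (acc : B) :
    l.foldl (fun b a => if p a then f b a else b) acc = (l.filter (fun a => decide (p a))).foldl f acc := by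
  induction l generalizing acc with
  | nil => rfl
  | cons a t ih =>
    by_cases h : p a <;> simp [h, ih]

-- A is gather-then-join over pvNames
theorem pv_A_eq_join (v : Int) : getEventFlagsName v = PySem.Str.join "|" (pvNames v) := by
  unfold getEventFlagsName pvNames
  rw [pv_foldl_filter (fun kv => PySem.Int.band v kv.1 ≠ 0)
      (fun name kv => if PySem.Str.len name = 0 then kv.2 else name ++ ("|" ++ kv.2)) pvValueNameMap ""]
  rw [show (List.filter (fun a => decide (PySem.Int.band v a.1 ≠ 0)) pvValueNameMap).foldl
        (fun name kv => if PySem.Str.len name = 0 then kv.2 else name ++ ("|" ++ kv.2)) ""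
      = ((List.filter (fun a => decide (PySem.Int.band v a.1 ≠ 0)) pvValueNameMap).map (·.2)).foldl
        (fun name s => if PySem.Str.len name = 0 then s else name ++ ("|" ++ s)) ""
    from (List.foldl_map (f := fun x : Int × String => x.2)
      (g := fun name s => if PySem.Str.len name = 0 then s else name ++ ("|" ++ s))).symm]
  have hne : ∀ s ∈ (pvValueNameMap.filter (fun kv => PySem.Int.band v kv.1 ≠ 0)).map (·.2),
      PySem.Str.len s ≠ 0 := by
    intro s hs
    simp only [List.mem_map, List.mem_filter, pvValueNameMap] at hs
    obtain ⟨kv, ⟨hm, _⟩, rfl⟩ := hs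
    fin_cases hm <;> decide
  cases hl : (pvValueNameMap.filter (fun kv => PySem.Int.band v kv.1 ≠ 0)).map (·.2) with
  | nil => rfl
  | cons s r =>
    have hs : PySem.Str.len s ≠ 0 := hne s (by rw [hl]; exact List.mem_cons_self)
    rw [List.foldl_cons, if_pos (by decide : PySem.Str.len "" = 0)]
    exact pv_join_aux r s hs

-- pvNames only depends on the value mod 64 (each flag bit is below 64)
theorem pv_names_pos (n : Nat) : pvNames (Int.ofNat n) = pvNames (Int.ofNat (n % 64)) := by
  have e1 : PySem.Int.band (Int.ofNat n) (1:Int) = PySem.Int.band (Int.ofNat (n % 64)) (1:Int) := pv_band_pos n 1 (by norm_num)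
  have e2 : PySem.Int.band (Int.ofNat n) (2:Int) = PySem.Int.band (Int.ofNat (n % 64)) (2:Int) := pv_band_pos n 2 (by norm_num)
  have e4 : PySem.Int.band (Int.ofNat n) (4:Int) = PySem.Int.band (Int.ofNat (n % 64)) (4:Int) := pv_band_pos n 4 (by norm_num)
  have e8 : PySem.Int.band (Int.ofNat n) (8:Int) = PySem.Int.band (Int.ofNat (n % 64)) (8:Int) := pv_band_pos n 8 (by norm_num)
  have e16 : PySem.Int.band (Int.ofNat n) (16:Int) = PySem.Int.band (Int.ofNat (n % 64)) (16:Int) := pv_band_pos n 16 (by norm_num)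
  have e32 : PySem.Int.band (Int.ofNat n) (32:Int) = PySem.Int.band (Int.ofNat (n % 64)) (32:Int) := pv_band_pos n 32 (by norm_num)
  simp only [pvNames, pvValueNameMap, List.filter, e1, e2, e4, e8, e16, e32]

theorem pv_names_neg (w : Nat) : pvNames (Int.negSucc w) = pvNames (Int.negSucc (w % 64)) := by
  have e1 : PySem.Int.band (Int.negSucc w) (1:Int) = PySem.Int.band (Int.negSucc (w % 64)) (1:Int) := pv_band_neg w 1 (by norm_num)
  have e2 : PySem.Int.band (Int.negSucc w) (2:Int) = PySem.Int.band (Int.negSucc (w % 64)) (2:Int) := pv_band_neg w 2 (by norm_num)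
  have e4 : PySem.Int.band (Int.negSucc w) (4:Int) = PySem.Int.band (Int.negSucc (w % 64)) (4:Int) := pv_band_neg w 4 (by norm_num)
  have e8 : PySem.Int.band (Int.negSucc w) (8:Int) = PySem.Int.band (Int.negSucc (w % 64)) (8:Int) := pv_band_neg w 8 (by norm_num)
  have e16 : PySem.Int.band (Int.negSucc w) (16:Int) = PySem.Int.band (Int.negSucc (w % 64)) (16:Int) := pv_band_neg w 16 (by norm_num)
  have e32 : PySem.Int.band (Int.negSucc w) (32:Int) = PySem.Int.band (Int.negSucc (w % 64)) (32:Int) := pv_band_neg w 32 (by norm_num)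
  simp only [pvNames, pvValueNameMap, List.filter, e1, e2, e4, e8, e16, e32]

-- on the 64 residues (of either sign) B's bit-peeling loop collects exactly pvNames
theorem pv_ball : ∀ u : Nat, u < 64 →
    pvCollect 64 (PySem.Int.band (Int.ofNat u) 63) [] = pvNames (Int.ofNat u)
    ∧ pvCollect 64 (PySem.Int.band (Int.negSucc u) 63) [] = pvNames (Int.negSucc u) := by
  decide

-- ===== VERDICT (by name: the statement is the Claim_ definition above) =====
theorem getEventFlagsName_spec : Claim_equal_getEventFlagsName := by
  intro v _
  unfold Spec_getEventFlagsName
  rw [pv_A_eq_join]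
  cases v with
  | ofNat n =>
    have hu : n % 64 < 64 := Nat.mod_lt _ (by norm_num)
    have e63 : PySem.Int.band (Int.ofNat n) (63:Int) = PySem.Int.band (Int.ofNat (n % 64)) (63:Int) :=
      pv_band_pos n 63 (by norm_num)
    unfold getEventFlagsName_alt
    rw [e63, (pv_ball (n % 64) hu).1, pv_names_pos]
  | negSucc w =>
    have hu : w % 64 < 64 := Nat.mod_lt _ (by norm_num)
    have e63 : PySem.Int.band (Int.negSucc w) (63:Int) = PySem.Int.band (Int.negSucc (w % 64)) (63:Int) :=
      pv_band_neg w 63 (by norm_num)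
    unfold getEventFlagsName_alt
    rw [e63, (pv_ball (w % 64) hu).2, pv_names_neg]
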